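-- pv_equiv track=rewrite | github.com/Jiajunnn/ee272_rs | hw3/dnn-accelerator-top-rtl/parse_datalifetimes.py | compute_lifetimes
-- ===== SOURCE A (Python) =====
-- from collections import defaultdict
--
-- def compute_lifetimes(events):
--     bufferaddr_events = defaultdict(list)
--
--     # 1) Group events by (buffer, address)
--     for (ts, op, buffer_str, addr) in events:
--         bufferaddr_events[(buffer_str, addr)].append((ts, op))
--
--     # 2) Compute lifetimes
--     lifetime_map = {}
--     for (bufferaddr, ev_list) in bufferaddr_events.items():
--         lifetimes = []
--         current_write_time = None
--         last_read_after_write = None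
--
--         for (ts, op) in ev_list:
--             if op == "Write":
--                 if current_write_time is not None and last_read_after_write is not None:
--                     if last_read_after_write > current_write_time:
--                         lifetimes.append(last_read_after_write - current_write_time)
--                 current_write_time = ts
--                 last_read_after_write = None
--             elif op == "Read":
--                 if current_write_time is not None and ts > current_write_time:
--                     last_read_after_write = ts
--
--         # Finalize last write
--         if current_write_time is not None and last_read_after_write is not None:
--             if last_read_after_write > current_write_time:
--                 lifetimes.append(last_read_after_write - current_write_time)
--
--         lifetime_map[bufferaddr] = lifetimes
--
--     return lifetime_map
-- ===== SOURCE B (Python) =====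
-- def _lifetimes(evs):
--     # Recursion on write-delimited segments: skip to the first Write, collect the
--     # segment up to the next Write, and take the last read strictly after the write.
--     while evs and evs[0][1] != "Write":
--         evs = evs[1:]
--     if not evs:
--         return []
--     w = evs[0][0]
--     rest = evs[1:]
--     seg = []
--     while rest and rest[0][1] != "Write":
--         seg.append(rest[0])
--         rest = rest[1:]
--     reads = [ts for (ts, op) in seg if op == "Read" and ts > w]
--     head = [reads[-1] - w] if reads else []
--     return head + _lifetimes(rest)
--
--
-- def compute_lifetimes(events):
--     # Group per key (first-appearance order), tracked with an explicit keys list,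
--     # then compute each key's lifetimes by write-segment recursion.
--     keys = []
--     per_key = {}
--     for (ts, op, buffer_str, addr) in events:
--         k = (buffer_str, addr)
--         if k in per_key:
--             per_key[k] = per_key[k] + [(ts, op)]
--         else:
--             keys.append(k)
--             per_key[k] = [(ts, op)]
--     return {k: _lifetimes(per_key[k]) for k in keys}
-- ===== Notes on version B (the rewrite author's own statement) =====
-- stated objective: alternative
-- what changed: Replaced A's per-key stateful scan (current_write/last_read state machine with in-loop and final flushes) by grouping with an explicit first-appearance key list and computing each key's lifetimes by recursion on write-delimited segments: skip to the first Write, take the segment up to the next Write, filter its reads after the write and use the last one.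
import Mathlib
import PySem

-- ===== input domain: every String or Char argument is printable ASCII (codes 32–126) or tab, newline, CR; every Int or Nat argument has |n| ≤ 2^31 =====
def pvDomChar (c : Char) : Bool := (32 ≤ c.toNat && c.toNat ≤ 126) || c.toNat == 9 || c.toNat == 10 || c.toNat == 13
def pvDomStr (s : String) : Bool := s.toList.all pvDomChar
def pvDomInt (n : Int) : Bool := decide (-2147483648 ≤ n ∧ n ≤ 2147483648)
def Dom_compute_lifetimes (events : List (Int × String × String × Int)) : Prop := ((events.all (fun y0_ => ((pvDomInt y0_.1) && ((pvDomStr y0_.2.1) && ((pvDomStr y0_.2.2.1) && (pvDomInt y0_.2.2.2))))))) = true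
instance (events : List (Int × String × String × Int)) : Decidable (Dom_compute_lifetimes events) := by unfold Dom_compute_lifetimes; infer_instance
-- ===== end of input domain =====

-- B replaces A's per-key stateful write/read scan by an explicit first-appearance key
-- list and a recursion on write-delimited segments (alternative decomposition).

-- ===== PORT A =====
-- inner loop body of A's phase 2 (state = (current_write_time, last_read_after_write, lifetimes))
def pvStepA (st : Option Int × Option Int × List Int) (e : Int × String) :
    Option Int × Option Int × List Int :=
  let (cw, lr, lifetimes) := st
  let (ts, op) := e
  if op == "Write" then
    let lifetimes :=
      match cw, lr with
      | some w, some r => if r > w then lifetimes ++ [r - w] else lifetimes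
      | _, _ => lifetimes
    (some ts, none, lifetimes)
  else if op == "Read" then
    match cw with
    | some w => if ts > w then (cw, some ts, lifetimes) else st
    | none => st
  else st

-- A's "finalize last write" block
def pvFinalA (st : Option Int × Option Int × List Int) : List Int :=
  match st with
  | (some w, some r, lifetimes) => if r > w then lifetimes ++ [r - w] else lifetimes
  | (_, _, lifetimes) => lifetimes

def compute_lifetimes (events : List (Int × String × String × Int)) : List (String × Int × List Int) :=
  -- 1) group events by (buffer, address)  (defaultdict(list) append)
  let bufferaddr_events : PySem.Dict (String × Int) (List (Int × String)) :=
    events.foldl (fun d e => d.modify (e.2.2.1, e.2.2.2) [] (· ++ [(e.1, e.2.1)])) PySem.Dict.empty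
  -- 2) compute lifetimes per group
  let lifetime_map : PySem.Dict (String × Int) (List Int) :=
    bufferaddr_events.items.foldl
      (fun m p => m.insert p.1 (pvFinalA (p.2.foldl pvStepA (none, none, [])))) PySem.Dict.empty
  lifetime_map.items.map (fun p => (p.1.1, p.1.2, p.2))

-- ===== PORT B =====
-- B's _lifetimes: recursion on write-delimited segments (the two while loops are
-- dropWhile/takeWhile over the same predicate; reads is the comprehension, reads[-1] its last)
def pvLifetimes (evs : List (Int × String)) : List Int :=
  match h : evs.dropWhile (fun e => e.2 != "Write") with
  | [] => []
  | e :: rest =>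
    let w := e.1
    let seg := rest.takeWhile (fun e2 => e2.2 != "Write")
    let tl := rest.dropWhile (fun e2 => e2.2 != "Write")
    let reads := (seg.filter (fun e2 => e2.2 == "Read" && decide (e2.1 > w))).map Prod.fst
    (match reads.getLast? with
     | some r => [r - w]
     | none => []) ++ pvLifetimes tl
termination_by evs.length
decreasing_by
  have h1 : (evs.dropWhile (fun e => e.2 != "Write")).length ≤ evs.length :=
    List.length_dropWhile_le _ _
  have h2 : (rest.dropWhile (fun e2 => e2.2 != "Write")).length ≤ rest.length :=
    List.length_dropWhile_le _ _
  rw [h] at h1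
  simp only [List.length_cons] at h1
  omega

def compute_lifetimes_alt (events : List (Int × String × String × Int)) : List (String × Int × List Int) :=
  -- group per key, keeping an explicit keys list in first-appearance order
  let grouped :=
    events.foldl
      (fun (st : List (String × Int) × PySem.Dict (String × Int) (List (Int × String))) e =>
        let k := (e.2.2.1, e.2.2.2)
        if st.2.contains k then
          (st.1, st.2.insert k (st.2.getD k [] ++ [(e.1, e.2.1)]))
        else
          (st.1 ++ [k], st.2.insert k [(e.1, e.2.1)]))
      ([], PySem.Dict.empty)
  grouped.1.map (fun k => (k.1, k.2, pvLifetimes (grouped.2.getD k [])))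

-- ===== PRECONDITION & SPEC =====
def Spec_compute_lifetimes (events : List (Int × String × String × Int)) (out : List (String × Int × List Int)) : Prop := out = compute_lifetimes_alt events
instance (events : List (Int × String × String × Int)) (out : List (String × Int × List Int)) : Decidable (Spec_compute_lifetimes events out) := by unfold Spec_compute_lifetimes; infer_instance

-- ===== CLAIM (what is proved, stated in full; the proofs are below) =====
def Claim_equal_compute_lifetimes : Prop := ∀ (events : List (Int × String × String × Int)), Dom_compute_lifetimes events → Spec_compute_lifetimes events (compute_lifetimes events)

-- ===== LEMMAS AND PROOFS =====

-- abbreviations used only by the proofs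
def pvP : Int × String → Bool := fun e => e.2 != "Write"

def pvQ (w : Int) : Int × String → Bool := fun e => e.2 == "Read" && decide (e.1 > w)

def pvFlush (w : Int) (lr : Option Int) : List Int :=
  match lr with
  | some r => if r > w then [r - w] else []
  | none => []

def pvUpd (w : Int) (lr : Option Int) (seg : List (Int × String)) : Option Int :=
  seg.foldl (fun r e => if pvQ w e then some e.1 else r) lr

def pvHead (w : Int) (seg : List (Int × String)) : List Int :=
  match ((seg.filter (pvQ w)).map Prod.fst).getLast? with
  | some r => [r - w]
  | none => []

theorem pv_dropWhile_head_false {l : List (Int × String)} {pp : Int × String → Bool} {e t}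
    (h : l.dropWhile pp = e :: t) : pp e = false := by
  have h2 : (l.dropWhile pp) ≠ [] := by rw [h]; simp
  have hh := List.head_dropWhile_not (l := l) (p := pp) h2
  have he : (l.dropWhile pp).head h2 = e := by simp [h]
  rwa [he] at hh

-- A's loop ignores everything before the first Write
theorem pv_fold_nonwrite (l : List (Int × String)) (acc : List Int) :
    l.foldl pvStepA (none, none, acc) = (l.dropWhile pvP).foldl pvStepA (none, none, acc) := by
  induction l with
  | nil => rfl
  | cons e l ih =>
    by_cases hw : e.2 = "Write"
    · have : pvP e = false := by simp [pvP, hw]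
      rw [List.dropWhile_cons, this]
      simp
    · have hp : pvP e = true := by simp [pvP, hw]
      have hid : pvStepA (none, none, acc) e = (none, none, acc) := by
        obtain ⟨ts, op⟩ := e
        simp only [pvStepA]
        simp only at hw
        rw [if_neg (by simpa using hw)]
        by_cases hr : op = "Read" <;> simp [hr]
      rw [List.dropWhile_cons, hp, List.foldl_cons, hid, ih]
      simp

-- over a write-free segment A's loop only updates last_read_after_write
theorem pv_fold_seg (seg : List (Int × String)) (w : Int) (lr : Option Int) (acc : List Int)
    (h : ∀ e ∈ seg, pvP e = true) :
    seg.foldl pvStepA (some w, lr, acc) = (some w, pvUpd w lr seg, acc) := by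
  induction seg generalizing lr with
  | nil => rfl
  | cons e seg ih =>
    obtain ⟨ts, op⟩ := e
    have hw : (op == "Write") = false := by
      have := h (ts, op) (by simp)
      simpa [pvP] using this
    have hstep : pvStepA (some w, lr, acc) (ts, op)
        = (some w, if pvQ w (ts, op) then some ts else lr, acc) := by
      simp only [pvStepA, hw]
      by_cases hr : op = "Read"
      · by_cases hts : ts > w <;> simp [hr, pvQ, hts]
      · simp [hr, pvQ]
    rw [List.foldl_cons, hstep, ih _ (fun e he => h e (by simp [he]))]
    simp only [pvUpd, List.foldl_cons]

theorem pv_getLast?_cons {α : Type} (a : α) (m : List α) :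
    (a :: m).getLast? = m.getLast?.or (some a) := by
  cases m with
  | nil => rfl
  | cons b m' =>
    rw [List.getLast?_cons_cons]
    cases h : (b :: m').getLast? with
    | none => simp at h
    | some r => rfl

theorem pv_foldl_some (l : List (Int × String)) (lr : Option Int) :
    l.foldl (fun (r : Option Int) e => some e.1) lr = ((l.map Prod.fst).getLast?).or lr := by
  induction l generalizing lr with
  | nil => rfl
  | cons e l ih =>
    rw [List.foldl_cons, ih, List.map_cons, pv_getLast?_cons]
    cases h : (l.map Prod.fst).getLast? <;> rfl

theorem pv_upd_or (seg : List (Int × String)) (w : Int) (lr : Option Int) :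
    pvUpd w lr seg = (((seg.filter (pvQ w)).map Prod.fst).getLast?).or lr := by
  rw [pvUpd, PySem.List.foldl_if_eq_foldl_filter, pv_foldl_some]

theorem pv_flush_upd (w : Int) (seg : List (Int × String)) :
    pvFlush w (pvUpd w (none : Option Int) seg) = pvHead w seg := by
  rw [pv_upd_or, Option.or_none, pvHead]
  cases h : ((seg.filter (pvQ w)).map Prod.fst).getLast? with
  | none => rfl
  | some r =>
    have hr : r > w := by
      have hm := List.mem_of_getLast? h
      obtain ⟨e, he, rfl⟩ := List.mem_map.mp hm
      have := List.of_mem_filter he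
      simp [pvQ] at this
      exact this.2
    simp [pvFlush, hr]

theorem pvLifetimes_eq (evs : List (Int × String)) :
    pvLifetimes evs =
      match evs.dropWhile pvP with
      | [] => []
      | e :: rest => pvHead e.1 (rest.takeWhile pvP) ++ pvLifetimes (rest.dropWhile pvP) := by
  have hP : pvP = (fun e : Int × String => e.2 != "Write") := rfl
  rw [pvLifetimes, hP]
  split
  · rename_i heq
    rw [heq]
  · rename_i e rest heq
    rw [heq]
    have hQ : pvQ e.1 = (fun e2 : Int × String => e2.2 == "Read" && decide (e2.1 > e.1)) := rfl
    simp only [pvHead, hQ]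

theorem pv_finalA_some (w : Int) (lr : Option Int) (acc : List Int) :
    pvFinalA (some w, lr, acc) = acc ++ pvFlush w lr := by
  cases lr with
  | none => simp [pvFinalA, pvFlush]
  | some r => by_cases hr : r > w <;> simp [pvFinalA, pvFlush, hr]

theorem pv_stepA_write_some (w ts : Int) (lr : Option Int) (acc : List Int) :
    pvStepA (some w, lr, acc) (ts, "Write") = (some ts, none, acc ++ pvFlush w lr) := by
  cases lr with
  | none => simp [pvStepA, pvFlush]
  | some r => by_cases hr : r > w <;> simp [pvStepA, pvFlush, hr]

theorem pv_stepA_write_none (ts : Int) (lr : Option Int) (acc : List Int) :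
    pvStepA (none, lr, acc) (ts, "Write") = (some ts, none, acc) := by
  simp [pvStepA]

theorem pvLifetimes_nil : pvLifetimes [] = [] := by
  rw [pvLifetimes_eq]
  rfl

theorem pv_ML2 (n : Nat) :
    ∀ (l : List (Int × String)) (w : Int) (lr : Option Int) (acc : List Int), l.length ≤ n →
    pvFinalA (l.foldl pvStepA (some w, lr, acc))
      = acc ++ pvFlush w (pvUpd w lr (l.takeWhile pvP)) ++ pvLifetimes (l.dropWhile pvP) := by
  induction n with
  | zero =>
    intro l w lr acc hl
    have hnil : l = [] := List.eq_nil_of_length_eq_zero (Nat.le_zero.mp hl)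
    subst hnil
    simp [pvUpd, pvLifetimes_nil, pv_finalA_some]
  | succ m ih =>
    intro l w lr acc hl
    have hsplit := List.takeWhile_append_dropWhile (p := pvP) (l := l)
    conv_lhs => rw [← hsplit]
    rw [List.foldl_append,
      pv_fold_seg _ _ _ _ (fun e he => List.mem_takeWhile_imp he)]
    cases hdw : l.dropWhile pvP with
    | nil => simp [pv_finalA_some, pvLifetimes_nil]
    | cons e t =>
      have hpe : pvP e = false := pv_dropWhile_head_false hdw
      have hwop : e.2 = "Write" := by simpa [pvP] using hpe
      have hlen : t.length ≤ m := by
        have h1 : (l.dropWhile pvP).length ≤ l.length := List.length_dropWhile_le _ _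
        rw [hdw] at h1; simp at h1; omega
      obtain ⟨ts, op⟩ := e
      simp only at hwop
      subst hwop
      rw [List.foldl_cons, pv_stepA_write_some, ih t ts none _ hlen,
        pv_flush_upd, pvLifetimes_eq ((ts, "Write") :: t),
        List.dropWhile_cons_of_neg (by simp [hpe])]
      simp

theorem pv_ML1 (l : List (Int × String)) :
    pvFinalA (l.foldl pvStepA (none, none, [])) = pvLifetimes l := by
  rw [pv_fold_nonwrite]
  cases hdw : l.dropWhile pvP with
  | nil =>
    rw [pvLifetimes_eq l, hdw]
    rfl
  | cons e t =>
    have hpe : pvP e = false := pv_dropWhile_head_false hdw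
    have hwop : e.2 = "Write" := by simpa [pvP] using hpe
    obtain ⟨ts, op⟩ := e
    simp only at hwop
    subst hwop
    rw [List.foldl_cons, pv_stepA_write_none,
      pv_ML2 t.length t ts none [] (le_refl _), pv_flush_upd,
      pvLifetimes_eq l, hdw]
    simp

theorem pv_group (l : List (Int × String × String × Int)) :
    ∀ (ks : List (String × Int)) (d : PySem.Dict (String × Int) (List (Int × String))),
    ks = d.keys →
    l.foldl
      (fun (st : List (String × Int) × PySem.Dict (String × Int) (List (Int × String))) e =>
        let k := (e.2.2.1, e.2.2.2)
        if st.2.contains k then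
          (st.1, st.2.insert k (st.2.getD k [] ++ [(e.1, e.2.1)]))
        else
          (st.1 ++ [k], st.2.insert k [(e.1, e.2.1)])) (ks, d)
      = ((l.foldl (fun d e => d.modify (e.2.2.1, e.2.2.2) [] (· ++ [(e.1, e.2.1)])) d).keys,
         l.foldl (fun d e => d.modify (e.2.2.1, e.2.2.2) [] (· ++ [(e.1, e.2.1)])) d) := by
  induction l with
  | nil => intro ks d h; simp [h]
  | cons e l ih =>
    intro ks d h
    rw [List.foldl_cons, List.foldl_cons]
    by_cases hc : d.contains (e.2.2.1, e.2.2.2) = true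
    · have hmod : d.modify (e.2.2.1, e.2.2.2) [] (· ++ [(e.1, e.2.1)])
          = d.insert (e.2.2.1, e.2.2.2) (d.getD (e.2.2.1, e.2.2.2) [] ++ [(e.1, e.2.1)]) := rfl
      simp only [hc, if_true]
      rw [hmod]
      exact ih _ _ (by rw [h, PySem.Dict.keys_insert_of_contains _ _ hc])
    · have hnc : d.contains (e.2.2.1, e.2.2.2) = false := by simpa using hc
      have hmod : d.modify (e.2.2.1, e.2.2.2) [] (· ++ [(e.1, e.2.1)])
          = d.insert (e.2.2.1, e.2.2.2) [(e.1, e.2.1)] := by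
        show d.insert _ (d.getD _ [] ++ [(e.1, e.2.1)]) = _
        rw [PySem.Dict.getD_of_not_contains _ _ hnc]
        rfl
      simp only [hnc, Bool.false_eq_true, if_false]
      rw [hmod]
      exact ih _ _ (by rw [h, PySem.Dict.keys_insert_of_not_contains _ _ hnc])

-- ===== VERDICT (by name: the statement is the Claim_ definition above) =====
theorem compute_lifetimes_spec : Claim_equal_compute_lifetimes := by
  intro events _
  unfold Spec_compute_lifetimes compute_lifetimes compute_lifetimes_alt
  set G := events.foldl (fun d e => d.modify (e.2.2.1, e.2.2.2) [] (· ++ [(e.1, e.2.1)]))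
      (PySem.Dict.empty : PySem.Dict (String × Int) (List (Int × String))) with hG
  have hndG : G.keys.Nodup := by
    rw [hG]
    exact PySem.Dict.nodup_keys_foldl_modify_key events (fun e => (e.2.2.1, e.2.2.2)) _ _ _
      PySem.Dict.nodup_keys_empty
  have hgrp := pv_group events [] PySem.Dict.empty rfl
  simp only [hgrp]
  have hAitems :
      (G.items.foldl (fun m p => m.insert p.1 (pvFinalA (p.2.foldl pvStepA (none, none, []))))
          (PySem.Dict.empty : PySem.Dict (String × Int) (List Int))).items
      = G.items.map (fun p => (p.1, pvFinalA (p.2.foldl pvStepA (none, none, [])))) := by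
    rw [PySem.Dict.items_foldl_insert_fresh]
    · rfl
    · intro a _; exact PySem.Dict.contains_empty _
    · exact hndG
  simp only [hAitems]
  rw [PySem.Dict.items_eq_map_keys G hndG []]
  simp only [List.map_map]
  apply List.map_congr_left
  intro k _
  simp only [Function.comp]
  rw [pv_ML1]
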